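-- pv_equiv track=rewrite | github.com/KuriAndKame/tgBotNewModel | llm_module/main.py | export_quote_from_text
-- ===== SOURCE A (Python) =====
-- def export_quote_from_text(text):
--     quotes = {}
--     k = 1  # номер цитаты (под цитатой понимаем текст в кавычках длинной более 30 символов)
--     i = 0
--     while i < len(text):
--         if text[i] == '"':
--             for j in range(i + 1, len(text)):
--                 if text[j] == '"':
--                     break
--             if j + 1 - i > 30:
--                 quote = text[i:j + 1]
--                 quotes[f"<<{k}>>"] = quote
--                 text = text[:i] + f"<<{k}>>" + text[j + 1:]
--                 k += 1
--             else:
--                 i = j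
--         i += 1
--     return text, quotes
-- ===== SOURCE B (Python) =====
-- def export_quote_from_text(text):
--     # One linear left-to-right pass: pair each '"' with the next one (or end of
--     # text if unclosed), emit placeholders for segments longer than 30 chars,
--     # build the result with a parts list + join instead of repeated slicing.
--     n = len(text)
--     parts = []
--     quotes = {}
--     k = 1
--     pos = 0
--     while True:
--         o = text.find('"', pos)
--         if o == -1:
--             parts.append(text[pos:])
--             break
--         c = text.find('"', o + 1)
--         e = n if c == -1 else c + 1
--         seg = text[o:e]
--         if len(seg) > 30:
--             ph = f"<<{k}>>"
--             parts.append(text[pos:o])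
--             parts.append(ph)
--             quotes[ph] = seg
--             k += 1
--         else:
--             parts.append(text[pos:e])
--         pos = e
--     return "".join(parts), quotes
-- ===== Notes on version B (the rewrite author's own statement) =====
-- stated objective: faster
-- what changed: Instead of rescanning and rebuilding the whole string with slice concatenation at every quote (and stepping index-by-index), B makes one linear pass that jumps between quote positions with str.find, pairs each opening quote with the next quote (or end of text if unclosed), and assembles the result from a parts list with a single join.
-- outside the precondition, e.g. on export_quote_from_text('"'): A raises UnboundLocalError, B returns ('"', {})
import Mathlib
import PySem

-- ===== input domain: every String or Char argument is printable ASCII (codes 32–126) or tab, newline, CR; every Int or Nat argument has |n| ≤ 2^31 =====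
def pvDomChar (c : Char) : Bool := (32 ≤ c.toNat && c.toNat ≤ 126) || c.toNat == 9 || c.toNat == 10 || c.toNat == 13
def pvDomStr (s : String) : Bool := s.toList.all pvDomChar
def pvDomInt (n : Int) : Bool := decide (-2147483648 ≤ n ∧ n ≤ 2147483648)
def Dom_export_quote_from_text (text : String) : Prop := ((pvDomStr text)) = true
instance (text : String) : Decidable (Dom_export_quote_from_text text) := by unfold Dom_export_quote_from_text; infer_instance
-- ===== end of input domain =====

-- B replaces A's per-quote rescan-and-rebuild (quadratic string concatenation) by one linear
-- pass that jumps between quote positions and joins a parts list; same return value on Pre_.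

-- first index of '"' in cs (Python text.find('"', 0)); shared scanning helper of both ports
def find1 : List Char → Option Nat
  | [] => none
  | c :: cs => if c = '"' then some 0 else (find1 cs).map (· + 1)

-- Python text.find('"', j) (exact: '"' is ASCII)
def pvFind (cs : List Char) (j : Nat) : Option Nat := (find1 (cs.drop j)).map (· + j)

-- ── lemmas the ports' termination arguments cite (about find1 and the digits of k) ──
theorem find1_none_notMem {cs : List Char} (h : find1 cs = none) : '"' ∉ cs := by
  induction cs with
  | nil => simp
  | cons c cs ih =>
    simp only [find1] at h
    by_cases hc : c = '"'
    · simp [hc] at h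
    · simp only [if_neg hc, Option.map_eq_none_iff] at h
      simp only [List.mem_cons, not_or]
      exact ⟨fun h' => hc h'.symm, ih h⟩

theorem find1_some_decomp {cs : List Char} {r : Nat} (h : find1 cs = some r) :
    r < cs.length ∧ '"' ∉ cs.take r ∧ cs.drop r = '"' :: cs.drop (r + 1) := by
  induction cs generalizing r with
  | nil => simp [find1] at h
  | cons c cs ih =>
    simp only [find1] at h
    by_cases hc : c = '"'
    · simp only [if_pos hc] at h
      cases h
      simp [hc]
    · simp only [if_neg hc, Option.map_eq_some_iff] at h
      obtain ⟨r', hr', rfl⟩ := h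
      obtain ⟨h1, h2, h3⟩ := ih hr'
      refine ⟨by simpa using h1, ?_, by simpa using h3⟩
      simp only [List.take_succ_cons, List.mem_cons, not_or]
      exact ⟨fun h' => hc h'.symm, h2⟩

theorem find1_none_count {cs : List Char} (h : find1 cs = none) : cs.count '"' = 0 :=
  List.count_eq_zero.mpr (find1_none_notMem h)

theorem find1_some_count {cs : List Char} {r : Nat} (h : find1 cs = some r) :
    cs.count '"' = (cs.drop (r + 1)).count '"' + 1 := by
  obtain ⟨h1, h2, h3⟩ := find1_some_decomp h
  conv_lhs => rw [← List.take_append_drop r cs]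
  rw [h3, List.count_append, List.count_cons, List.count_eq_zero.mpr h2]
  simp

theorem pvFind_some {cs : List Char} {p o : Nat} (h : pvFind cs p = some o) :
    p ≤ o ∧ o < cs.length ∧ find1 (cs.drop p) = some (o - p) := by
  simp only [pvFind, Option.map_eq_some_iff] at h
  obtain ⟨r, hr, rfl⟩ := h
  have := (find1_some_decomp hr).1
  simp only [List.length_drop] at this
  exact ⟨by omega, by omega, by simpa using hr⟩

theorem pvFind_none {cs : List Char} {p : Nat} (h : pvFind cs p = none) :
    find1 (cs.drop p) = none := by
  simpa [pvFind] using h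

theorem digitChar_ne_quote (m : Nat) : Nat.digitChar m ≠ '"' := by
  match m with
  | 0 | 1 | 2 | 3 | 4 | 5 | 6 | 7 | 8 | 9 | 10 | 11 | 12 | 13 | 14 | 15 => decide
  | (n + 16) => simp [Nat.digitChar]

theorem toDigitsCore_quoteFree (f : Nat) : ∀ (n : Nat) (ds : List Char), '"' ∉ ds →
    '"' ∉ Nat.toDigitsCore 10 f n ds := by
  induction f with
  | zero => intro n ds h; simpa [Nat.toDigitsCore] using h
  | succ f ih =>
    intro n ds h
    simp only [Nat.toDigitsCore]
    split
    · simp [h, (digitChar_ne_quote (n % 10)).symm]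
    · exact ih _ _ (by simp [h, (digitChar_ne_quote (n % 10)).symm])

theorem toStr_quoteFree (k : Int) : '"' ∉ (PySem.Int.toStr k).toList := by
  rw [PySem.Int.toList_toStr]
  unfold PySem.Int.toChars Nat.toDigits
  split
  · simp only [List.mem_cons]
    rintro (h | h)
    · exact absurd h (by decide)
    · exact toDigitsCore_quoteFree _ _ _ (by simp) h
  · exact toDigitsCore_quoteFree _ _ _ (by simp)

theorem ph_quoteFree (k : Int) : '"' ∉ ("<<" ++ PySem.Int.toStr k ++ ">>").toList := by
  simp only [String.toList_append, List.mem_append]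
  rintro ((h | h) | h)
  · exact absurd h (by decide)
  · exact toStr_quoteFree k h
  · exact absurd h (by decide)

theorem ph_length_pos (k : Int) : 0 < ("<<" ++ PySem.Int.toStr k ++ ">>").toList.length := by
  simp [String.toList_append]

-- ===== PORT A =====
-- A's while-loop; state = (current text, quotes dict, next quote number k, index i).
-- Terminates on every input by the lexicographic measure (quotes right of i, chars right of i);
-- where Python's inner for-loop leaves j unbound or stale (an unmatched '"' as the final
-- character — A raises UnboundLocalError or reuses a stale j there; outside Pre_) the port
-- returns the current state instead.
def loopA (text : List Char) (q : PySem.Dict String String) (k : Int) (i : Nat) :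
    List Char × PySem.Dict String String :=
  if hi : i < text.length then
    if text[i] = '"' then
      match hj : pvFind text (i + 1) with
      | some j =>
        -- inner for-loop broke at the first '"' after i
        if ((j : Int) + 1 - (i : Int) > 30) then
          let ph := "<<" ++ PySem.Int.toStr k ++ ">>"
          let quote := (text.drop i).take (j + 1 - i)
          loopA (text.take i ++ ph.toList ++ text.drop (j + 1))
                (q.insert ph (String.ofList quote)) (k + 1) (i + 1)
        else loopA text q k (j + 1)
      | none =>
        if hlt : i + 1 < text.length then
          -- inner for-loop ran out without break: j = len(text) - 1
          if (((text.length - 1 : Nat) : Int) + 1 - (i : Int) > 30) then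
            let ph := "<<" ++ PySem.Int.toStr k ++ ">>"
            let quote := (text.drop i).take (text.length - 1 + 1 - i)
            loopA (text.take i ++ ph.toList ++ text.drop (text.length - 1 + 1))
                  (q.insert ph (String.ofList quote)) (k + 1) (i + 1)
          else loopA text q k (text.length - 1 + 1)
        else (text, q)  -- Python: j unbound/stale (outside Pre_)
    else loopA text q k (i + 1)
  else (text, q)
termination_by ((text.drop i).count '"', text.length - i)
decreasing_by
  · -- replace, found j: quotes to the right strictly decrease
    apply Prod.Lex.left
    obtain ⟨hle, hlt', hf⟩ := pvFind_some hj
    have hd : text.drop i = text[i] :: text.drop (i + 1) := List.drop_eq_getElem_cons hi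
    have hc1 : (text.drop i).count '"' = (text.drop (i + 1)).count '"' + 1 := by
      rw [hd, List.count_cons]; simp [*]
    have hc2 : (text.drop (i + 1)).count '"' = ((text.drop (i + 1)).drop (j - (i + 1) + 1)).count '"' + 1 :=
      find1_some_count hf
    have hdd : (text.drop (i + 1)).drop (j - (i + 1) + 1) = text.drop (j + 1) := by
      rw [List.drop_drop]; congr 1; omega
    rw [hdd] at hc2
    have hlen : (text.take i).length = i := by simp; omega
    have hsplit : (text.take i ++ (("<<" ++ PySem.Int.toStr k ++ ">>").toList) ++ text.drop (j + 1)).drop (i + 1)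
        = (("<<" ++ PySem.Int.toStr k ++ ">>").toList).drop 1 ++ text.drop (j + 1) := by
      rw [List.append_assoc, List.drop_append, hlen]
      have h1 : (text.take i).drop (i + 1) = [] := by
        apply List.drop_eq_nil_of_le; simp
      have h2 : i + 1 - i = 1 := by omega
      rw [h1, List.nil_append, h2, List.drop_append]
      have h3 : (1 : Nat) - (("<<" ++ PySem.Int.toStr k ++ ">>").toList).length = 0 := by
        have := ph_length_pos k; omega
      rw [h3, List.drop_zero]
    rw [hsplit, List.count_append]
    have hph : ((("<<" ++ PySem.Int.toStr k ++ ">>").toList).drop 1).count '"' = 0 := by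
      apply List.count_eq_zero.mpr
      intro hmem
      exact ph_quoteFree k (List.mem_of_mem_drop hmem)
    omega
  · -- skip, found j
    apply Prod.Lex.left
    obtain ⟨hle, hlt', hf⟩ := pvFind_some hj
    have hd : text.drop i = text[i] :: text.drop (i + 1) := List.drop_eq_getElem_cons hi
    have hc1 : (text.drop i).count '"' = (text.drop (i + 1)).count '"' + 1 := by
      rw [hd, List.count_cons]; simp [*]
    have hc2 : (text.drop (i + 1)).count '"' = ((text.drop (i + 1)).drop (j - (i + 1) + 1)).count '"' + 1 :=
      find1_some_count hf
    have hdd : (text.drop (i + 1)).drop (j - (i + 1) + 1) = text.drop (j + 1) := by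
      rw [List.drop_drop]; congr 1; omega
    rw [hdd] at hc2
    omega
  · -- replace, no break (j = len - 1)
    apply Prod.Lex.left
    have hf := pvFind_none hj
    have hd : text.drop i = text[i] :: text.drop (i + 1) := List.drop_eq_getElem_cons hi
    have hc1 : (text.drop i).count '"' = (text.drop (i + 1)).count '"' + 1 := by
      rw [hd, List.count_cons]; simp [*]
    have hc2 : (text.drop (i + 1)).count '"' = 0 := find1_none_count hf
    have hdn : text.drop (text.length - 1 + 1) = ([] : List Char) := by
      apply List.drop_eq_nil_of_le; omega
    have hlen : (text.take i).length = i := by simp; omega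
    have hsplit : (text.take i ++ (("<<" ++ PySem.Int.toStr k ++ ">>").toList) ++ text.drop (text.length - 1 + 1)).drop (i + 1)
        = (("<<" ++ PySem.Int.toStr k ++ ">>").toList).drop 1 ++ text.drop (text.length - 1 + 1) := by
      rw [List.append_assoc, List.drop_append, hlen]
      have h1 : (text.take i).drop (i + 1) = [] := by
        apply List.drop_eq_nil_of_le; simp
      have h2 : i + 1 - i = 1 := by omega
      rw [h1, List.nil_append, h2, List.drop_append]
      have h3 : (1 : Nat) - (("<<" ++ PySem.Int.toStr k ++ ">>").toList).length = 0 := by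
        have := ph_length_pos k; omega
      rw [h3, List.drop_zero]
    rw [hsplit, hdn, List.count_append]
    have hph : ((("<<" ++ PySem.Int.toStr k ++ ">>").toList).drop 1).count '"' = 0 := by
      apply List.count_eq_zero.mpr
      intro hmem
      exact ph_quoteFree k (List.mem_of_mem_drop hmem)
    simp only [List.count_nil]
    omega
  · -- skip, no break: i jumps to len
    apply Prod.Lex.left
    have hf := pvFind_none hj
    have hd : text.drop i = text[i] :: text.drop (i + 1) := List.drop_eq_getElem_cons hi
    have hc1 : (text.drop i).count '"' = (text.drop (i + 1)).count '"' + 1 := by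
      rw [hd, List.count_cons]; simp [*]
    have hdn : text.drop (text.length - 1 + 1) = ([] : List Char) := by
      apply List.drop_eq_nil_of_le; omega
    rw [hdn]
    simp only [List.count_nil]
    omega
  · -- walk: same quotes, one char fewer to the right
    have hd : text.drop i = text[i] :: text.drop (i + 1) := List.drop_eq_getElem_cons hi
    have hc : (text.drop (i + 1)).count '"' = (text.drop i).count '"' := by
      rw [hd, List.count_cons]; simp [*]
    exact hc ▸ Prod.Lex.right _ (by omega)

def export_quote_from_text (text : String) : String × (List (String × String)) :=
  let r := loopA text.toList PySem.Dict.empty 1 0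
  (String.ofList r.1, r.2.items)

-- ===== PORT B =====
-- B's while-loop over the ORIGINAL text: jump to the next '"' with find, pair it with the
-- following '"' (or the end of text), append to a parts list, join once at the end.
def loopB (cs : List Char) (pos : Nat) (k : Int) (parts : List (List Char))
    (q : PySem.Dict String String) : List Char × PySem.Dict String String :=
  match ho : pvFind cs pos with
  | none => ((parts ++ [cs.drop pos]).flatten, q)
  | some o =>
    let e := match pvFind cs (o + 1) with
      | none => cs.length
      | some c => c + 1
    let seg := (cs.drop o).take (e - o)
    if 30 < seg.length then
      let ph := "<<" ++ PySem.Int.toStr k ++ ">>"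
      loopB cs e (k + 1) (parts ++ [(cs.drop pos).take (o - pos), ph.toList])
        (q.insert ph (String.ofList seg))
    else
      loopB cs e k (parts ++ [(cs.drop pos).take (e - pos)]) q
termination_by cs.length - pos
decreasing_by
  all_goals
    obtain ⟨h1, h2, -⟩ := pvFind_some ho
    rcases hq : pvFind cs (o + 1) with _ | c
    · simp only [hq, Nat.sub_self]
      exact Nat.sub_pos_of_lt (Nat.lt_of_le_of_lt h1 h2)
    · obtain ⟨hc1, hc2, -⟩ := pvFind_some hq
      simp only [hq]
      exact Nat.sub_lt_sub_left (Nat.lt_of_le_of_lt h1 h2)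
        (Nat.lt_succ_of_le (Nat.le_trans h1 (Nat.le_of_succ_le hc1)))

def export_quote_from_text_alt (text : String) : String × (List (String × String)) :=
  let r := loopB text.toList 0 1 [] PySem.Dict.empty
  (String.ofList r.1, r.2.items)

-- ===== PRECONDITION & SPEC =====
-- Pre_ excludes exactly the texts with an odd number of '"' whose last character is '"':
-- there A's inner for-loop leaves j unbound (UnboundLocalError) or stale, so A raises,
-- loops forever, or returns a value manufactured from the stale index.
def Pre_export_quote_from_text (text : String) : Prop :=
  text.toList.count '"' % 2 = 0 ∨ text.toList.getLast? ≠ some '"'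
instance (text : String) : Decidable (Pre_export_quote_from_text text) := by
  unfold Pre_export_quote_from_text; infer_instance

def pvWitness_export_quote_from_text : String := "say \"hi\" now"

def Spec_export_quote_from_text (text : String) (out : String × (List (String × String))) : Prop := out = export_quote_from_text_alt text
instance (text : String) (out : String × (List (String × String))) : Decidable (Spec_export_quote_from_text text out) := by unfold Spec_export_quote_from_text; infer_instance

-- ===== CLAIM (what is proved, stated in full; the proofs are below) =====
def Claim_equal_export_quote_from_text : Prop := ∀ (text : String), Dom_export_quote_from_text text → Pre_export_quote_from_text text → Spec_export_quote_from_text text (export_quote_from_text text)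

-- ===== LEMMAS AND PROOFS =====

-- common functional description both loops compute: process the suffix `rest`
def process (rest : List Char) (k : Int) (q : PySem.Dict String String) :
    List Char × PySem.Dict String String :=
  match h1 : find1 rest with
  | none => (rest, q)
  | some o =>
    match h2 : find1 (rest.drop (o + 1)) with
    | some c =>
      if 30 < o + 1 + c + 1 - o then
        let ph := "<<" ++ PySem.Int.toStr k ++ ">>"
        let r := process (rest.drop (o + 1 + c + 1)) (k + 1)
          (q.insert ph (String.ofList ((rest.drop o).take (o + 1 + c + 1 - o))))
        (rest.take o ++ ph.toList ++ r.1, r.2)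
      else
        let r := process (rest.drop (o + 1 + c + 1)) k q
        (rest.take (o + 1 + c + 1) ++ r.1, r.2)
    | none =>
      if 30 < rest.length - o then
        let ph := "<<" ++ PySem.Int.toStr k ++ ">>"
        (rest.take o ++ ph.toList, q.insert ph (String.ofList (rest.drop o)))
      else (rest, q)
termination_by rest.length
decreasing_by
  all_goals
    have := (find1_some_decomp h1).1
    simp only [List.length_drop]
    omega

-- one-step unfolding lemmas for process
theorem process_none {rest : List Char} {k : Int} {q : PySem.Dict String String}
    (h : find1 rest = none) : process rest k q = (rest, q) := by
  rw [process.eq_def]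
  split
  · rfl
  · next o heq => rw [h] at heq; cases heq

theorem process_close_long {rest : List Char} {o c : Nat} {k : Int} {q : PySem.Dict String String}
    (h1 : find1 rest = some o) (h2 : find1 (rest.drop (o + 1)) = some c)
    (hcond : 30 < o + 1 + c + 1 - o) :
    process rest k q =
      ((rest.take o ++ ("<<" ++ PySem.Int.toStr k ++ ">>").toList ++
          (process (rest.drop (o + 1 + c + 1)) (k + 1)
            (q.insert ("<<" ++ PySem.Int.toStr k ++ ">>")
              (String.ofList ((rest.drop o).take (o + 1 + c + 1 - o))))).1),
        (process (rest.drop (o + 1 + c + 1)) (k + 1)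
          (q.insert ("<<" ++ PySem.Int.toStr k ++ ">>")
            (String.ofList ((rest.drop o).take (o + 1 + c + 1 - o))))).2) := by
  rw [process.eq_def]
  split
  · next heq => rw [h1] at heq; cases heq
  · next o' heq =>
    rw [h1] at heq
    injection heq with ho'; subst ho'
    split
    · next c' heq2 =>
      rw [h2] at heq2
      injection heq2 with hc'; subst hc'
      rw [if_pos hcond]
    · next heq2 => rw [h2] at heq2; cases heq2

theorem process_close_short {rest : List Char} {o c : Nat} {k : Int} {q : PySem.Dict String String}
    (h1 : find1 rest = some o) (h2 : find1 (rest.drop (o + 1)) = some c)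
    (hcond : ¬ 30 < o + 1 + c + 1 - o) :
    process rest k q =
      (rest.take (o + 1 + c + 1) ++ (process (rest.drop (o + 1 + c + 1)) k q).1,
        (process (rest.drop (o + 1 + c + 1)) k q).2) := by
  rw [process.eq_def]
  split
  · next heq => rw [h1] at heq; cases heq
  · next o' heq =>
    rw [h1] at heq
    injection heq with ho'; subst ho'
    split
    · next c' heq2 =>
      rw [h2] at heq2
      injection heq2 with hc'; subst hc'
      rw [if_neg hcond]
    · next heq2 => rw [h2] at heq2; cases heq2

theorem process_noclose_long {rest : List Char} {o : Nat} {k : Int} {q : PySem.Dict String String}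
    (h1 : find1 rest = some o) (h2 : find1 (rest.drop (o + 1)) = none)
    (hcond : 30 < rest.length - o) :
    process rest k q =
      (rest.take o ++ ("<<" ++ PySem.Int.toStr k ++ ">>").toList,
        q.insert ("<<" ++ PySem.Int.toStr k ++ ">>") (String.ofList (rest.drop o))) := by
  rw [process.eq_def]
  split
  · next heq => rw [h1] at heq; cases heq
  · next o' heq =>
    rw [h1] at heq
    injection heq with ho'; subst ho'
    split
    · next c' heq2 => rw [h2] at heq2; cases heq2
    · next heq2 => rw [if_pos hcond]

theorem process_noclose_short {rest : List Char} {o : Nat} {k : Int} {q : PySem.Dict String String}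
    (h1 : find1 rest = some o) (h2 : find1 (rest.drop (o + 1)) = none)
    (hcond : ¬ 30 < rest.length - o) :
    process rest k q = (rest, q) := by
  rw [process.eq_def]
  split
  · next heq => rw [h1] at heq
  · next o' heq =>
    rw [h1] at heq
    injection heq with ho'; subst ho'
    split
    · next c' heq2 => rw [h2] at heq2; cases heq2
    · next heq2 => rw [if_neg hcond]

-- GoodSuffix: the remaining suffix never ends in an unmatched '"'
def GoodSuffix (cs : List Char) : Prop :=
  cs.count '"' % 2 = 0 ∨ cs.getLast? ≠ some '"'


theorem find1_none_of_notMem {cs : List Char} (h : '"' ∉ cs) : find1 cs = none := by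
  induction cs with
  | nil => rfl
  | cons c cs ih =>
    simp only [List.mem_cons, not_or] at h
    simp only [find1, if_neg (fun hc : c = '"' => h.1 hc.symm), ih h.2, Option.map_none]

theorem find1_append_some {nq rest : List Char} {o : Nat} (hn : '"' ∉ nq)
    (h : find1 rest = some o) : find1 (nq ++ rest) = some (nq.length + o) := by
  induction nq with
  | nil => simpa using h
  | cons c nq ih =>
    simp only [List.mem_cons, not_or] at hn
    simp only [List.cons_append, find1, if_neg (fun hc : c = '"' => hn.1 hc.symm), ih hn.2,
      Option.map_some, List.length_cons]
    exact congrArg some (by omega)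

theorem find1_append_none {nq rest : List Char} (hn : '"' ∉ nq)
    (h : find1 rest = none) : find1 (nq ++ rest) = none := by
  apply find1_none_of_notMem
  simp only [List.mem_append, not_or]
  exact ⟨hn, find1_none_notMem h⟩

theorem pv_drop_append {α : Type} (nq rest : List α) (t u : Nat) (h : t = nq.length + u) :
    (nq ++ rest).drop t = rest.drop u := by
  subst h
  rw [List.drop_append]
  have h1 : nq.drop (nq.length + u) = [] := List.drop_eq_nil_of_le (by omega)
  have h2 : nq.length + u - nq.length = u := by omega
  rw [h1, h2, List.nil_append]

theorem pv_take_append {α : Type} (nq rest : List α) (t u : Nat) (h : t = nq.length + u) :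
    (nq ++ rest).take t = nq ++ rest.take u := by
  subst h
  rw [List.take_append]
  have h1 : nq.take (nq.length + u) = nq := List.take_of_length_le (by omega)
  have h2 : nq.length + u - nq.length = u := by omega
  rw [h1, h2]

theorem pv_drop_drop {α : Type} (cs : List α) (a b d : Nat) (h : d = b + a) :
    (cs.drop a).drop b = cs.drop d := by
  subst h
  rw [List.drop_drop, Nat.add_comm]

-- process over a quote-free prefix: the prefix is copied through unchanged
theorem process_prepend {nq rest : List Char} {k : Int} {q : PySem.Dict String String}
    (hn : '"' ∉ nq) :
    process (nq ++ rest) k q = (nq ++ (process rest k q).1, (process rest k q).2) := by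
  rcases h1 : find1 rest with _ | o
  · rw [process_none h1, process_none (find1_append_none hn h1)]
  · have h1' : find1 (nq ++ rest) = some (nq.length + o) := find1_append_some hn h1
    have hol := (find1_some_decomp h1).1
    have hdrop1 : (nq ++ rest).drop (nq.length + o + 1) = rest.drop (o + 1) :=
      pv_drop_append _ _ _ _ (by omega)
    have htake : (nq ++ rest).take (nq.length + o) = nq ++ rest.take o :=
      pv_take_append _ _ _ _ rfl
    have hdropo : (nq ++ rest).drop (nq.length + o) = rest.drop o :=
      pv_drop_append _ _ _ _ rfl
    rcases h2 : find1 (rest.drop (o + 1)) with _ | c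
    · have h2' : find1 ((nq ++ rest).drop (nq.length + o + 1)) = none := by rw [hdrop1]; exact h2
      by_cases hcond : 30 < rest.length - o
      · have hcond' : 30 < (nq ++ rest).length - (nq.length + o) := by
          simp only [List.length_append]; omega
        rw [process_noclose_long h1 h2 hcond, process_noclose_long h1' h2' hcond',
          htake, hdropo]
        simp [List.append_assoc]
      · have hcond' : ¬ 30 < (nq ++ rest).length - (nq.length + o) := by
          simp only [List.length_append]; omega
        rw [process_noclose_short h1 h2 hcond, process_noclose_short h1' h2' hcond']
    · have h2' : find1 ((nq ++ rest).drop (nq.length + o + 1)) = some c := by rw [hdrop1]; exact h2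
      have hdrop2 : (nq ++ rest).drop (nq.length + o + 1 + c + 1) = rest.drop (o + 1 + c + 1) :=
        pv_drop_append _ _ _ _ (by omega)
      have hseg : ((nq ++ rest).drop (nq.length + o)).take (nq.length + o + 1 + c + 1 - (nq.length + o))
          = (rest.drop o).take (o + 1 + c + 1 - o) := by
        rw [hdropo, show nq.length + o + 1 + c + 1 - (nq.length + o) = o + 1 + c + 1 - o from by omega]
      by_cases hcond : 30 < o + 1 + c + 1 - o
      · have hcond' : 30 < nq.length + o + 1 + c + 1 - (nq.length + o) := by omega
        rw [process_close_long h1 h2 hcond, process_close_long h1' h2' hcond',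
          htake, hdrop2, hseg]
        simp [List.append_assoc]
      · have hcond' : ¬ 30 < nq.length + o + 1 + c + 1 - (nq.length + o) := by omega
        rw [process_close_short h1 h2 hcond, process_close_short h1' h2' hcond', hdrop2]
        refine ?_
        have hx : (nq ++ rest).take (nq.length + o + 1 + c + 1) = nq ++ rest.take (o + 1 + c + 1) :=
          pv_take_append _ _ _ _ (by omega)
        rw [hx]
        simp [List.append_assoc]

theorem getLast?_drop_ne_nil {cs : List Char} {n : Nat} (h : cs.drop n ≠ []) :
    cs.getLast? = (cs.drop n).getLast? := by
  conv_lhs => rw [← List.take_append_drop n cs]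
  exact List.getLast?_append_of_ne_nil _ h

theorem good_drop {cs : List Char} (n : Nat) (hg : GoodSuffix cs)
    (hpar : (cs.drop n).count '"' % 2 = cs.count '"' % 2) : GoodSuffix (cs.drop n) := by
  by_cases hnil : cs.drop n = []
  · left; simp [hnil]
  · rcases hg with hcnt | hlast
    · left; omega
    · right; rw [← getLast?_drop_ne_nil hnil]; exact hlast

theorem good_prepend {nq cs : List Char} (hn : '"' ∉ nq) (hg : GoodSuffix cs) :
    GoodSuffix (nq ++ cs) := by
  by_cases hnil : cs = []
  · left
    subst hnil
    simp [List.count_eq_zero.mpr hn]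
  · rcases hg with hcnt | hlast
    · left
      rw [List.count_append, List.count_eq_zero.mpr hn]
      simpa using hcnt
    · right
      rw [List.getLast?_append_of_ne_nil _ hnil]
      exact hlast

theorem pv_drop_mid {α : Type} (xs mid post : List α) (i : Nat) (hi : i ≤ xs.length)
    (hm : 0 < mid.length) :
    (xs.take i ++ mid ++ post).drop (i + 1) = mid.drop 1 ++ post := by
  have hlen : (xs.take i).length = i := by rw [List.length_take, Nat.min_eq_left hi]
  rw [List.append_assoc, List.drop_append, hlen,
    List.drop_eq_nil_of_le (by rw [hlen]; omega), List.nil_append,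
    show i + 1 - i = 1 from by omega, List.drop_append,
    show (1 : Nat) - mid.length = 0 from by omega, List.drop_zero]

theorem pv_take_mid {α : Type} (xs mid post : List α) (i : Nat) (hi : i ≤ xs.length)
    (hm : 0 < mid.length) :
    (xs.take i ++ mid ++ post).take (i + 1) = xs.take i ++ mid.take 1 := by
  have hlen : (xs.take i).length = i := by rw [List.length_take, Nat.min_eq_left hi]
  rw [List.append_assoc, List.take_append, List.take_of_length_le (by rw [hlen]; omega), hlen,
    show i + 1 - i = 1 from by omega, List.take_append,
    show (1 : Nat) - mid.length = 0 from by omega, List.take_zero, List.append_nil]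

theorem pv_take_split {α : Type} (cs : List α) (i t u : Nat) (hi : i ≤ cs.length)
    (h : u = t - i) (hit : i ≤ t) :
    cs.take t = cs.take i ++ (cs.drop i).take u := by
  subst h
  conv_lhs => rw [← List.take_append_drop i cs]
  rw [List.take_append, List.take_of_length_le (by rw [List.length_take, Nat.min_eq_left hi]; omega),
    List.length_take, Nat.min_eq_left hi]

theorem loopA_eq (text : List Char) (q : PySem.Dict String String) (k : Int) (i : Nat)
    (hle : i ≤ text.length) (hg : GoodSuffix (text.drop i)) :
    loopA text q k i =
      (text.take i ++ (process (text.drop i) k q).1, (process (text.drop i) k q).2) := by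
  revert hle hg
  fun_induction loopA text q k i with
  | case1 text q k i hi hq j hj hcond ph quote ih =>
    intro hle hg
    obtain ⟨hij, hjl, hfr⟩ := pvFind_some hj
    have hph : ph = "<<" ++ PySem.Int.toStr k ++ ">>" := rfl
    have hquote : quote = (text.drop i).take (j + 1 - i) := rfl
    have hphnq : '"' ∉ ph.toList.drop 1 := fun hm => ph_quoteFree k (List.mem_of_mem_drop hm)
    have hplen : 0 < ph.toList.length := ph_length_pos k
    have hd : text.drop i = '"' :: text.drop (i + 1) := by
      rw [List.drop_eq_getElem_cons hi, hq]
    have h1 : find1 (text.drop i) = some 0 := by rw [hd]; simp [find1]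
    have h2 : find1 ((text.drop i).drop (0 + 1)) = some (j - (i + 1)) := by
      rw [hd]; exact hfr
    have hcondN : 30 < 0 + 1 + (j - (i + 1)) + 1 - 0 := by omega
    rw [process_close_long h1 h2 hcondN]
    have hA : (text.drop i).drop (0 + 1 + (j - (i + 1)) + 1) = text.drop (j + 1) :=
      pv_drop_drop _ _ _ _ (by omega)
    have hseg : ((text.drop i).drop 0).take (0 + 1 + (j - (i + 1)) + 1 - 0)
        = (text.drop i).take (j + 1 - i) := by
      rw [List.drop_zero, show 0 + 1 + (j - (i + 1)) + 1 - 0 = j + 1 - i from by omega]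
    rw [hA, hseg, List.take_zero, List.nil_append]
    -- the left-hand side via the induction hypothesis
    have hsplit : (text.take i ++ ph.toList ++ text.drop (j + 1)).drop (i + 1)
        = ph.toList.drop 1 ++ text.drop (j + 1) := pv_drop_mid _ _ _ _ (by omega) hplen
    have htakes : (text.take i ++ ph.toList ++ text.drop (j + 1)).take (i + 1)
        = text.take i ++ ph.toList.take 1 := pv_take_mid _ _ _ _ (by omega) hplen
    have hgd : GoodSuffix (text.drop (j + 1)) := by
      have hx : (text.drop i).drop (j + 1 - i) = text.drop (j + 1) :=
        pv_drop_drop _ _ _ _ (by omega)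
      have hc1 : (text.drop i).count '"' = (text.drop (i + 1)).count '"' + 1 := by
        rw [hd, List.count_cons]
        simp
      have hc2 := find1_some_count hfr
      have hc3 : (text.drop (i + 1)).drop (j - (i + 1) + 1) = text.drop (j + 1) :=
        pv_drop_drop _ _ _ _ (by omega)
      rw [hc3] at hc2
      have hpar : ((text.drop i).drop (j + 1 - i)).count '"' % 2 = (text.drop i).count '"' % 2 := by
        rw [hx]; omega
      have := good_drop (j + 1 - i) hg hpar
      rwa [hx] at this
    have hlen' : i + 1 ≤ (text.take i ++ ph.toList ++ text.drop (j + 1)).length := by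
      simp only [List.length_append, List.length_take]
      omega
    have hgood' : GoodSuffix ((text.take i ++ ph.toList ++ text.drop (j + 1)).drop (i + 1)) := by
      rw [hsplit]
      exact good_prepend hphnq hgd
    rw [ih hlen' hgood', hsplit, htakes, process_prepend hphnq]
    simp only [hph, hquote, List.append_assoc]
    rw [← List.append_assoc (("<<" ++ PySem.Int.toStr k ++ ">>").toList.take 1)
      (("<<" ++ PySem.Int.toStr k ++ ">>").toList.drop 1), List.take_append_drop]
  | case2 text q k i hi hq j hj hcond ih =>
    intro hle hg
    obtain ⟨hij, hjl, hfr⟩ := pvFind_some hj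
    have hd : text.drop i = '"' :: text.drop (i + 1) := by
      rw [List.drop_eq_getElem_cons hi, hq]
    have h1 : find1 (text.drop i) = some 0 := by rw [hd]; simp [find1]
    have h2 : find1 ((text.drop i).drop (0 + 1)) = some (j - (i + 1)) := by
      rw [hd]; exact hfr
    have hcondN : ¬ 30 < 0 + 1 + (j - (i + 1)) + 1 - 0 := by omega
    rw [process_close_short h1 h2 hcondN]
    have hA : (text.drop i).drop (0 + 1 + (j - (i + 1)) + 1) = text.drop (j + 1) :=
      pv_drop_drop _ _ _ _ (by omega)
    have hgd : GoodSuffix (text.drop (j + 1)) := by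
      have hx : (text.drop i).drop (j + 1 - i) = text.drop (j + 1) :=
        pv_drop_drop _ _ _ _ (by omega)
      have hc1 : (text.drop i).count '"' = (text.drop (i + 1)).count '"' + 1 := by
        rw [hd, List.count_cons]
        simp
      have hc2 := find1_some_count hfr
      have hc3 : (text.drop (i + 1)).drop (j - (i + 1) + 1) = text.drop (j + 1) :=
        pv_drop_drop _ _ _ _ (by omega)
      rw [hc3] at hc2
      have hpar : ((text.drop i).drop (j + 1 - i)).count '"' % 2 = (text.drop i).count '"' % 2 := by
        rw [hx]; omega
      have := good_drop (j + 1 - i) hg hpar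
      rwa [hx] at this
    rw [ih (by omega) hgd, hA,
      show 0 + 1 + (j - (i + 1)) + 1 = j + 1 - i from by omega, ← List.append_assoc,
      ← pv_take_split text i (j + 1) (j + 1 - i) hle rfl (by omega)]
  | case3 text q k i hi hq hj hlt hcond ph quote ih =>
    intro hle hg
    have hph : ph = "<<" ++ PySem.Int.toStr k ++ ">>" := rfl
    have hquote : quote = (text.drop i).take (text.length - 1 + 1 - i) := rfl
    have hphnq : '"' ∉ ph.toList.drop 1 := fun hm => ph_quoteFree k (List.mem_of_mem_drop hm)
    have hplen : 0 < ph.toList.length := ph_length_pos k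
    have hd : text.drop i = '"' :: text.drop (i + 1) := by
      rw [List.drop_eq_getElem_cons hi, hq]
    have h1 : find1 (text.drop i) = some 0 := by rw [hd]; simp [find1]
    have hfr' : find1 (text.drop (i + 1)) = none := pvFind_none hj
    have h2 : find1 ((text.drop i).drop (0 + 1)) = none := by
      rw [hd]; exact hfr'
    have hcondN : 30 < (text.drop i).length - 0 := by
      simp only [List.length_drop]
      omega
    rw [process_noclose_long h1 h2 hcondN]
    have hdl : text.drop (text.length - 1 + 1) = ([] : List Char) :=
      List.drop_eq_nil_of_le (by omega)
    have hsplit : (text.take i ++ ph.toList ++ text.drop (text.length - 1 + 1)).drop (i + 1)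
        = ph.toList.drop 1 ++ text.drop (text.length - 1 + 1) := pv_drop_mid _ _ _ _ (by omega) hplen
    have htakes : (text.take i ++ ph.toList ++ text.drop (text.length - 1 + 1)).take (i + 1)
        = text.take i ++ ph.toList.take 1 := pv_take_mid _ _ _ _ (by omega) hplen
    have hlen' : i + 1 ≤ (text.take i ++ ph.toList ++ text.drop (text.length - 1 + 1)).length := by
      simp only [List.length_append, List.length_take]
      omega
    have hgood' : GoodSuffix ((text.take i ++ ph.toList ++ text.drop (text.length - 1 + 1)).drop (i + 1)) := by
      rw [hsplit, hdl, List.append_nil]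
      left
      rw [List.count_eq_zero.mpr hphnq]
    rw [ih hlen' hgood', hsplit, htakes, hdl, List.append_nil,
      process_none (find1_none_of_notMem hphnq)]
    have hqt : (text.drop i).take (text.length - 1 + 1 - i) = text.drop i :=
      List.take_of_length_le (by simp only [List.length_drop]; omega)
    simp only [hph, hquote, hqt, List.drop_zero, List.take_zero, List.nil_append,
      List.append_assoc]
    rw [List.take_append_drop]
  | case4 text q k i hi hq hj hlt hcond ih =>
    intro hle hg
    have hlq : text.length - 1 + 1 = text.length := by omega
    have hd : text.drop i = '"' :: text.drop (i + 1) := by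
      rw [List.drop_eq_getElem_cons hi, hq]
    have h1 : find1 (text.drop i) = some 0 := by rw [hd]; simp [find1]
    have hfr' : find1 (text.drop (i + 1)) = none := pvFind_none hj
    have h2 : find1 ((text.drop i).drop (0 + 1)) = none := by
      rw [hd]; exact hfr'
    have hcondN : ¬ 30 < (text.drop i).length - 0 := by
      simp only [List.length_drop]
      omega
    rw [process_noclose_short h1 h2 hcondN]
    have hgd : GoodSuffix (text.drop (text.length - 1 + 1)) := by
      rw [hlq, List.drop_length]
      left
      simp
    rw [ih (by omega) hgd, hlq, List.drop_length, process_none rfl, List.take_length]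
    simp
  | case5 text q k i hi hq hj hnlt =>
    intro hle hg
    exfalso
    have hd1 : text.drop i = ['"'] := by
      rw [List.drop_eq_getElem_cons hi, hq, List.drop_eq_nil_of_le (show text.length ≤ i + 1 from by omega)]
    rcases hg with hcnt | hlast
    · rw [hd1] at hcnt
      simp at hcnt
    · rw [hd1] at hlast
      simp at hlast
  | case6 text q k i hi hq ih =>
    intro hle hg
    have hd : text.drop i = text[i] :: text.drop (i + 1) := List.drop_eq_getElem_cons hi
    have hnq : '"' ∉ [text[i]] := by
      simp only [List.mem_singleton]
      exact fun hh => hq hh.symm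
    have hgd : GoodSuffix (text.drop (i + 1)) := by
      have hx : (text.drop i).drop 1 = text.drop (i + 1) := pv_drop_drop _ _ _ _ (by omega)
      have hpar : ((text.drop i).drop 1).count '"' % 2 = (text.drop i).count '"' % 2 := by
        rw [hx, hd, List.count_cons]
        simp only [beq_iff_eq]
        rw [if_neg hq]
        simp
      have := good_drop 1 hg hpar
      rwa [hx] at this
    have hts : text.take (i + 1) = text.take i ++ [text[i]] := by
      rw [List.take_succ, List.getElem?_eq_getElem hi]
      simp
    rw [ih (by omega) hgd, hd,
      show (text[i] :: text.drop (i + 1)) = [text[i]] ++ text.drop (i + 1) from rfl,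
      process_prepend hnq]
    rw [hts, List.append_assoc]
  | case7 text q k i hi =>
    intro hle hg
    have hieq : i = text.length := by omega
    rw [hieq, List.drop_length, List.take_length, process_none rfl]
    simp

theorem loopB_eq (cs : List Char) (pos : Nat) (k : Int) (parts : List (List Char))
    (q : PySem.Dict String String) :
    loopB cs pos k parts q =
      (parts.flatten ++ (process (cs.drop pos) k q).1, (process (cs.drop pos) k q).2) := by
  fun_induction loopB cs pos k parts q with
  | case1 pos k parts q ho =>
    rw [process_none (pvFind_none ho)]
    simp
  | case2 pos k parts q o ho e seg h ph ih =>
    obtain ⟨hpo, hol, hfo⟩ := pvFind_some ho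
    have hdd : (cs.drop pos).drop (o - pos + 1) = cs.drop (o + 1) :=
      pv_drop_drop _ _ _ _ (by omega)
    rw [ih]
    clear ih
    have hph : ph = "<<" ++ PySem.Int.toStr k ++ ">>" := rfl
    rcases hc : pvFind cs (o + 1) with _ | c
    · have he : e = cs.length := by
        show (match pvFind cs (o + 1) with | none => cs.length | some c => c + 1) = cs.length
        rw [hc]
      have hfc : find1 ((cs.drop pos).drop (o - pos + 1)) = none := by
        rw [hdd]; exact pvFind_none hc
      have hsege : seg = cs.drop o := by
        show ((cs.drop o).take (e - o)) = cs.drop o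
        rw [he]
        apply List.take_of_length_le
        simp
      have hl : seg.length = cs.length - o := by rw [hsege]; simp
      have hcond : 30 < (cs.drop pos).length - (o - pos) := by
        simp only [List.length_drop]
        omega
      rw [process_noclose_long hfo hfc hcond]
      have hoo : (cs.drop pos).drop (o - pos) = cs.drop o :=
        pv_drop_drop _ _ _ _ (by omega)
      have hdl : cs.drop e = [] := by rw [he]; simp
      rw [hdl, process_none rfl, hoo, hph, hsege]
      simp [List.flatten_append, List.append_assoc]
    · have he : e = c + 1 := by
        show (match pvFind cs (o + 1) with | none => cs.length | some c => c + 1) = c + 1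
        rw [hc]
      obtain ⟨hoc, hcl, hfcr⟩ := pvFind_some hc
      have hfc : find1 ((cs.drop pos).drop (o - pos + 1)) = some (c - (o + 1)) := by
        rw [hdd]; exact hfcr
      have hl : seg.length = c + 1 - o := by
        show ((cs.drop o).take (e - o)).length = _
        rw [he]
        simp only [List.length_take, List.length_drop]
        omega
      have hcond : 30 < (o - pos) + 1 + (c - (o + 1)) + 1 - (o - pos) := by omega
      rw [process_close_long hfo hfc hcond]
      have h1 : (cs.drop pos).drop ((o - pos) + 1 + (c - (o + 1)) + 1) = cs.drop e := by
        rw [he]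
        exact pv_drop_drop _ _ _ _ (by omega)
      have h2 : ((cs.drop pos).drop (o - pos)).take ((o - pos) + 1 + (c - (o + 1)) + 1 - (o - pos))
          = seg := by
        rw [pv_drop_drop (cs := cs) (a := pos) (b := o - pos) (d := o) (by omega)]
        show _ = (cs.drop o).take (e - o)
        rw [he, show (o - pos) + 1 + (c - (o + 1)) + 1 - (o - pos) = c + 1 - o from by omega]
      have h3 : (cs.drop pos).take (o - pos) = (cs.drop pos).take (o - pos) := rfl
      rw [h1, h2, hph]
      simp [List.flatten_append, List.append_assoc]
  | case3 pos k parts q o ho e seg h ih =>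
    obtain ⟨hpo, hol, hfo⟩ := pvFind_some ho
    have hdd : (cs.drop pos).drop (o - pos + 1) = cs.drop (o + 1) :=
      pv_drop_drop _ _ _ _ (by omega)
    rw [ih]
    clear ih
    rcases hc : pvFind cs (o + 1) with _ | c
    · have he : e = cs.length := by
        show (match pvFind cs (o + 1) with | none => cs.length | some c => c + 1) = cs.length
        rw [hc]
      have hfc : find1 ((cs.drop pos).drop (o - pos + 1)) = none := by
        rw [hdd]; exact pvFind_none hc
      have hl : seg.length = cs.length - o := by
        show ((cs.drop o).take (e - o)).length = _
        rw [he]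
        simp
      have hcond : ¬ 30 < (cs.drop pos).length - (o - pos) := by
        simp only [List.length_drop]
        omega
      rw [process_noclose_short hfo hfc hcond]
      have hdl : cs.drop e = [] := by rw [he]; simp
      have htk : (cs.drop pos).take (e - pos) = cs.drop pos := by
        rw [he]
        apply List.take_of_length_le
        simp
      rw [hdl, process_none rfl, htk]
      simp [List.flatten_append]
    · have he : e = c + 1 := by
        show (match pvFind cs (o + 1) with | none => cs.length | some c => c + 1) = c + 1
        rw [hc]
      obtain ⟨hoc, hcl, hfcr⟩ := pvFind_some hc
      have hfc : find1 ((cs.drop pos).drop (o - pos + 1)) = some (c - (o + 1)) := by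
        rw [hdd]; exact hfcr
      have hl : seg.length = c + 1 - o := by
        show ((cs.drop o).take (e - o)).length = _
        rw [he]
        simp only [List.length_take, List.length_drop]
        omega
      have hcond : ¬ 30 < (o - pos) + 1 + (c - (o + 1)) + 1 - (o - pos) := by omega
      rw [process_close_short hfo hfc hcond]
      have h1 : (cs.drop pos).drop ((o - pos) + 1 + (c - (o + 1)) + 1) = cs.drop e := by
        rw [he]
        exact pv_drop_drop _ _ _ _ (by omega)
      have h2 : (cs.drop pos).take ((o - pos) + 1 + (c - (o + 1)) + 1)
          = (cs.drop pos).take (e - pos) := by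
        rw [he, show (o - pos) + 1 + (c - (o + 1)) + 1 = c + 1 - pos from by omega]
      rw [h1, h2]
      simp [List.flatten_append, List.append_assoc]

-- ===== VERDICT (by name: the statement is the Claim_ definition above) =====
theorem export_quote_from_text_spec : Claim_equal_export_quote_from_text := by
  intro text _ hpre
  unfold Spec_export_quote_from_text export_quote_from_text export_quote_from_text_alt
  have hA := loopA_eq text.toList PySem.Dict.empty 1 0 (by omega) (by simpa [GoodSuffix] using hpre)
  have hB := loopB_eq text.toList 0 1 [] PySem.Dict.empty
  simp only [List.drop_zero] at hA hB
  rw [hA, hB]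
  simp
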